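-- pv_equiv track=rewrite | github.com/dcoffield97/rubiks_cube | scripts/rubiks_cube/rubiks_cube.py | Get_Colored_Cube_Side
-- ===== SOURCE A (Python) =====
-- def Get_Blank_Cube_Side():
--     #assigns cube sides as blank
--     blank_cube_side = """[][][]
--                          [][][]
--                          [][][]"""
--
--     return blank_cube_side
--
-- def Get_Colored_Cube_Side(color):
--     #assigning to empty arrays
--     colored_cube_side = []
--     colored_cube_side_table = []
--     #calling functions
--     blank_cube_side = Get_Blank_Cube_Side()
--     blank_cube_side_table = Get_Cube_Side_Table(blank_cube_side)
--     #going through each sides of the blank cube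
--     for blank_cube_row in blank_cube_side_table:
--         colored_cube_row = []
--         ##goes through each blank side and assigns a color
--         for blank_cube_block in blank_cube_row:
--             colored_cube_block = blank_cube_block.replace("[]", str("[" + color["STR_ID"] + "]"))
--             colored_cube_row.append(colored_cube_block)
--         colored_cube_side_table.append(colored_cube_row)
--     colored_cube_side = colored_cube_side_table
--
--     return colored_cube_side
--
-- def Get_Cube_Side_Table(cube_side):
--     cube_side_table = []
--     cube_side_rows = cube_side.split("\n")
--     for cube_side_row in cube_side_rows:
--         cube_side_row = cube_side_row.replace(" ", "")
--         cube_side_row = cube_side_row.replace("][", "],[")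
--         cube_side_row = cube_side_row.split(",")
--         cube_side_table.append(cube_side_row)
--
--     return cube_side_table
-- ===== SOURCE B (Python) =====
-- def Get_Colored_Cube_Side(color):
--     # Simpler: build the cell string once and replicate it into a 3x3 table,
--     # with no blank-side string parsing at all.
--     cell = "[" + color["STR_ID"] + "]"
--     return [[cell] * 3 for _ in range(3)]
-- ===== Notes on version B (the rewrite author's own statement) =====
-- stated objective: simpler
-- what changed: Dropped the Get_Blank_Cube_Side/Get_Cube_Side_Table string-splitting-and-replacing pipeline; B computes the '[STR_ID]' cell string once and directly replicates it into a 3x3 list of lists.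
import Mathlib
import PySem

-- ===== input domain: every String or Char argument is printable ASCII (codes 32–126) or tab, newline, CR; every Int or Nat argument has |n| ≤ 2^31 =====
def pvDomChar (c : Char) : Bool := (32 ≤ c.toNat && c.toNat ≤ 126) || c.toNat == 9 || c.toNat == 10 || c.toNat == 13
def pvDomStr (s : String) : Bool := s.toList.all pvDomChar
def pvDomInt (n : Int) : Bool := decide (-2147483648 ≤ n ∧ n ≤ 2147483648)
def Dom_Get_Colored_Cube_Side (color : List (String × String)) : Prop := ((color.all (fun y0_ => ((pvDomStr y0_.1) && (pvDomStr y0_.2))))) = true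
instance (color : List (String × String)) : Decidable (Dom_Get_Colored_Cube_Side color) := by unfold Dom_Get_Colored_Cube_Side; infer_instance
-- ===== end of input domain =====

-- B drops A's blank-side string parsing (split/replace) and directly replicates the cell string into a 3x3 table (simpler decomposition).
-- Pre_ excludes dicts without a "STR_ID" key, on which A raises KeyError.


-- ===== PORT A =====
def Get_Blank_Cube_Side : String :=
  "[][][]\n                         [][][]\n                         [][][]"

def Get_Cube_Side_Table (cube_side : String) : List (List String) :=
  ((PySem.Str.split? cube_side "\n").getD []).foldl
    (fun cube_side_table cube_side_row =>
      let r1 := PySem.Str.replace cube_side_row " " ""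
      let r2 := PySem.Str.replace r1 "][" "],["
      cube_side_table ++ [(PySem.Str.split? r2 ",").getD []]) []

def Get_Colored_Cube_Side (color : List (String × String)) : List (List String) :=
  -- color["STR_ID"]: KeyError when absent is excluded by Pre_; getD "" is never hit there
  let c := ((PySem.Dict.mk color).get? "STR_ID").getD ""
  let blank_cube_side := Get_Blank_Cube_Side
  let blank_cube_side_table := Get_Cube_Side_Table blank_cube_side
  blank_cube_side_table.foldl
    (fun colored_cube_side_table blank_cube_row =>
      let colored_cube_row := blank_cube_row.foldl
        (fun row blank_cube_block =>
          row ++ [PySem.Str.replace blank_cube_block "[]" ("[" ++ c ++ "]")]) []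
      colored_cube_side_table ++ [colored_cube_row]) []

-- ===== PORT B =====
def Get_Colored_Cube_Side_alt (color : List (String × String)) : List (List String) :=
  let cell := "[" ++ ((PySem.Dict.mk color).get? "STR_ID").getD "" ++ "]"
  List.replicate 3 (List.replicate 3 cell)

-- ===== PRECONDITION & SPEC =====
-- Pre_ excludes exactly the inputs where A raises KeyError: no "STR_ID" key.
def Pre_Get_Colored_Cube_Side (color : List (String × String)) : Prop :=
  ((PySem.Dict.mk color).get? "STR_ID").isSome = true
instance (color : List (String × String)) : Decidable (Pre_Get_Colored_Cube_Side color) := by unfold Pre_Get_Colored_Cube_Side; infer_instance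
def pvWitness_Get_Colored_Cube_Side : (List (String × String)) := [("STR_ID", "R")]

def Spec_Get_Colored_Cube_Side (color : List (String × String)) (out : List (List String)) : Prop := out = Get_Colored_Cube_Side_alt color
instance (color : List (String × String)) (out : List (List String)) : Decidable (Spec_Get_Colored_Cube_Side color out) := by unfold Spec_Get_Colored_Cube_Side; infer_instance

-- ===== CLAIM (what is proved, stated in full; the proofs are below) =====
def Claim_equal_Get_Colored_Cube_Side : Prop := ∀ (color : List (String × String)), Dom_Get_Colored_Cube_Side color → Pre_Get_Colored_Cube_Side color → Spec_Get_Colored_Cube_Side color (Get_Colored_Cube_Side color)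

-- ===== LEMMAS AND PROOFS =====
-- Python "[]".replace("[]", r) = r, for any replacement string r
theorem replace_brackets (r : String) : PySem.Str.replace "[]" "[]" r = r := by
  simp [PySem.Str.replace, PySem.Chars.replace, PySem.Chars.replace.go]

-- the parsed blank side is the constant 3x3 table of "[]" cells
theorem table_blank :
    Get_Cube_Side_Table Get_Blank_Cube_Side =
      [["[]", "[]", "[]"], ["[]", "[]", "[]"], ["[]", "[]", "[]"]] := by decide

-- ===== VERDICT (by name: the statement is the Claim_ definition above) =====
theorem Get_Colored_Cube_Side_spec : Claim_equal_Get_Colored_Cube_Side := by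
  intro color _ _
  unfold Spec_Get_Colored_Cube_Side Get_Colored_Cube_Side Get_Colored_Cube_Side_alt
  simp only []
  rw [show Get_Cube_Side_Table Get_Blank_Cube_Side =
      [["[]", "[]", "[]"], ["[]", "[]", "[]"], ["[]", "[]", "[]"]] from table_blank]
  simp [List.foldl, replace_brackets, List.replicate]
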